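-- pv_equiv track=rewrite | github.com/squeeze-team/AgriJedi | agent/main.py | select_crop_from_market_prices
-- ===== SOURCE A (Python) =====
-- from typing import Any, Callable, Dict, List, Literal, TypedDict
--
-- def normalize_crop_type(crop: str) -> str:
--     aliases = {
--         "corn": "maize",
--         "soybean": "soy",
--         "grapes": "grape",
--         "vineyard": "grape",
--         "vineyards": "grape",
--         "wine": "grape",
--     }
--     value = crop.strip().lower()
--     if not value:
--         return "wheat"
--     return aliases.get(value, value)
--
-- def map_crop_type_to_market_crop(crop_type: str) -> str:
--     crop = normalize_crop_type(crop_type)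
--     if crop == "maize":
--         return "maize"
--     if crop == "grape":
--         return "grape"
--     return "wheat"
--
-- def select_crop_from_market_prices(prices: Dict[str, Any], crop_type: str) -> tuple[str, str]:
--     preferred = map_crop_type_to_market_crop(crop_type)
--     if preferred in prices:
--         return preferred, "query_crop_match"
--     for candidate in ["wheat", "maize", "grape"]:
--         if candidate in prices:
--             return candidate, f"fallback_to_{candidate}"
--     return "wheat", "default_wheat"
-- ===== SOURCE B (Python) =====
-- def select_crop_from_market_prices(prices, crop_type):
--     aliases = {
--         "corn": "maize",
--         "soybean": "soy",
--         "grapes": "grape",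
--         "vineyard": "grape",
--         "vineyards": "grape",
--         "wine": "grape",
--     }
--     value = crop_type.strip().lower()
--     crop = aliases.get(value, value) if value else "wheat"
--     preferred = crop if crop in ("maize", "grape") else "wheat"
--     # one pass over the price data itself: keep the best (lowest) priority rank seen
--     rank_of = {"wheat": 1, "maize": 2, "grape": 3}
--     best = 4
--     for key in prices:
--         r = 0 if key == preferred else rank_of.get(key, 4)
--         if r < best:
--             best = r
--     if best == 0:
--         return preferred, "query_crop_match"
--     if best == 4:
--         return "wheat", "default_wheat"
--     names = {1: "wheat", 2: "maize", 3: "grape"}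
--     name = names.get(best, "wheat")
--     return name, "fallback_to_" + name
-- ===== Notes on version B (the rewrite author's own statement) =====
-- stated objective: alternative
-- what changed: Instead of probing the dict for the preferred key and then for each fixed fallback candidate, B makes a single pass over the price entries themselves, folding a minimum priority rank (0=preferred, 1=wheat, 2=maize, 3=grape) into an accumulator and decoding the winning rank at the end.
import Mathlib
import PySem

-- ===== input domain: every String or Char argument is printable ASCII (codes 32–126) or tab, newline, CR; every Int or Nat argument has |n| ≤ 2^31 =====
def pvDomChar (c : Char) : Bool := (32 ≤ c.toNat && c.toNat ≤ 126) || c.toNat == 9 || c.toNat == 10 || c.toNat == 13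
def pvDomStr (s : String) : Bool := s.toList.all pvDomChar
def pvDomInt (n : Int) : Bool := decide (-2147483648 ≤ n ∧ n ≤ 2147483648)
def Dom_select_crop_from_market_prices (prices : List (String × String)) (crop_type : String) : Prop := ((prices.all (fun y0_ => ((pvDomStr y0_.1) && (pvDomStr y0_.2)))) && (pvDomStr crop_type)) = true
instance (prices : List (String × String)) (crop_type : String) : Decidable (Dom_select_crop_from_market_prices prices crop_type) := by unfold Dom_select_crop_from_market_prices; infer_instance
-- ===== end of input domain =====

-- B replaces A's probe-the-dict-per-candidate selection with a single pass over the price entries that folds a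
-- minimum priority rank and decodes it at the end; same return value everywhere (objective: alternative).


-- ===== PORT A =====
def pvAliases : PySem.Dict String String :=
  PySem.Dict.ofList [("corn", "maize"), ("soybean", "soy"), ("grapes", "grape"),
    ("vineyard", "grape"), ("vineyards", "grape"), ("wine", "grape")]

def normalize_crop_type (crop : String) : String :=
  let value := PySem.Str.lower (PySem.Str.strip crop)
  if value = "" then "wheat" else pvAliases.getD value value

def map_crop_type_to_market_crop (crop_type : String) : String :=
  let crop := normalize_crop_type crop_type
  if crop = "maize" then "maize"
  else if crop = "grape" then "grape"
  else "wheat"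

-- the membership test 'k in prices' on the dict's keys
def pvMem (prices : List (String × String)) (k : String) : Bool :=
  prices.any (fun p => p.1 == k)

-- the 'for candidate in [...]' fallback loop of A
def pvFallback (prices : List (String × String)) : List String → String × String
  | [] => ("wheat", "default_wheat")
  | c :: rest => if pvMem prices c then (c, "fallback_to_" ++ c) else pvFallback prices rest

def select_crop_from_market_prices (prices : List (String × String)) (crop_type : String) : String × String :=
  let preferred := map_crop_type_to_market_crop crop_type
  if pvMem prices preferred then (preferred, "query_crop_match")
  else pvFallback prices ["wheat", "maize", "grape"]

-- ===== PORT B =====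
def pvRankOf : PySem.Dict String Int :=
  PySem.Dict.ofList [("wheat", 1), ("maize", 2), ("grape", 3)]

def pvNames : PySem.Dict Int String :=
  PySem.Dict.ofList [(1, "wheat"), (2, "maize"), (3, "grape")]

def select_crop_from_market_prices_alt (prices : List (String × String)) (crop_type : String) : String × String :=
  let value := PySem.Str.lower (PySem.Str.strip crop_type)
  let crop := if value = "" then "wheat" else pvAliases.getD value value
  let preferred := if crop = "maize" ∨ crop = "grape" then crop else "wheat"
  let best := prices.foldl (fun best p =>
      let r := if p.1 = preferred then (0 : Int) else pvRankOf.getD p.1 4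
      if r < best then r else best) 4
  if best = 0 then (preferred, "query_crop_match")
  else if best = 4 then ("wheat", "default_wheat")
  else
    let name := pvNames.getD best "wheat"
    (name, "fallback_to_" ++ name)

-- ===== PRECONDITION & SPEC =====
def Spec_select_crop_from_market_prices (prices : List (String × String)) (crop_type : String) (out : String × String) : Prop := out = select_crop_from_market_prices_alt prices crop_type
instance (prices : List (String × String)) (crop_type : String) (out : String × String) : Decidable (Spec_select_crop_from_market_prices prices crop_type out) := by unfold Spec_select_crop_from_market_prices; infer_instance

-- ===== CLAIM (what is proved, stated in full; the proofs are below) =====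
def Claim_equal_select_crop_from_market_prices : Prop := ∀ (prices : List (String × String)) (crop_type : String), Dom_select_crop_from_market_prices prices crop_type → Spec_select_crop_from_market_prices prices crop_type (select_crop_from_market_prices prices crop_type)

-- ===== LEMMAS AND PROOFS =====

-- the rank B's fold assigns to one price key, and the minimum rank over the price keys
def pvRank (pref k : String) : Int :=
  if k = pref then 0 else pvRankOf.getD k 4

def pvMinRank (pref : String) : List (String × String) → Int
  | [] => 4
  | p :: rest => min (pvRank pref p.1) (pvMinRank pref rest)

theorem rankOf_char (k : String) :
    pvRankOf.getD k 4 = if k = "wheat" then 1 else if k = "maize" then 2 else if k = "grape" then 3 else 4 := by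
  have h : pvRankOf = ((PySem.Dict.empty.insert "wheat" 1).insert "maize" 2).insert "grape" 3 := by rfl
  rw [h]
  simp only [PySem.Dict.getD_insert, PySem.Dict.getD_empty]
  split_ifs <;> simp_all

theorem rank_bounds (pref k : String) : 0 ≤ pvRank pref k ∧ pvRank pref k ≤ 4 := by
  unfold pvRank
  rw [rankOf_char]
  split_ifs <;> omega

-- B's fold is the running minimum of the ranks of the keys seen
theorem fold_eq_min (pref : String) (prices : List (String × String)) :
    ∀ b : Int, b ≤ 4 →
      prices.foldl (fun best p =>
        let r := if p.1 = pref then (0 : Int) else pvRankOf.getD p.1 4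
        if r < best then r else best) b = min b (pvMinRank pref prices) := by
  induction prices with
  | nil => intro b hb; simp [pvMinRank]; omega
  | cons p rest ih =>
    intro b hb
    simp only [List.foldl_cons, pvMinRank]
    have h := rank_bounds pref p.1
    have h2 : (if (if p.1 = pref then (0:Int) else pvRankOf.getD p.1 4) < b
            then (if p.1 = pref then (0:Int) else pvRankOf.getD p.1 4) else b)
           = min b (pvRank pref p.1) := by
      unfold pvRank at *; split_ifs <;> omega
    rw [h2, ih _ (by unfold pvRank at h; omega)]
    omega

-- the minimum rank, characterized by the four membership tests A performs
theorem minRank_char (pref : String) (prices : List (String × String)) :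
    pvMinRank pref prices =
      if pvMem prices pref then 0
      else if pvMem prices "wheat" then 1
      else if pvMem prices "maize" then 2
      else if pvMem prices "grape" then 3
      else 4 := by
  induction prices with
  | nil => simp [pvMinRank, pvMem]
  | cons p rest ih =>
    simp only [pvMinRank, ih, pvMem, List.any_cons, Bool.or_eq_true, beq_iff_eq]
    unfold pvRank
    rw [rankOf_char]
    split_ifs <;> first | omega | tauto

-- A's preferred crop equals B's inline preferred crop
theorem pref_eq (crop_type : String) :
    (let value := PySem.Str.lower (PySem.Str.strip crop_type)
     let crop := if value = "" then "wheat" else pvAliases.getD value value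
     if crop = "maize" ∨ crop = "grape" then crop else "wheat")
      = map_crop_type_to_market_crop crop_type := by
  unfold map_crop_type_to_market_crop normalize_crop_type
  by_cases h1 : PySem.Str.lower (PySem.Str.strip crop_type) = ""
  · simp [h1]
  · simp only [h1, if_false]
    by_cases h2 : pvAliases.getD (PySem.Str.lower (PySem.Str.strip crop_type)) (PySem.Str.lower (PySem.Str.strip crop_type)) = "maize"
    · simp [h2]
    · by_cases h3 : pvAliases.getD (PySem.Str.lower (PySem.Str.strip crop_type)) (PySem.Str.lower (PySem.Str.strip crop_type)) = "grape"
      · simp [h3]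
      · simp [h2, h3]

theorem ab_eq (prices : List (String × String)) (crop_type : String) :
    select_crop_from_market_prices prices crop_type = select_crop_from_market_prices_alt prices crop_type := by
  unfold select_crop_from_market_prices select_crop_from_market_prices_alt
  simp only [pref_eq]
  rw [fold_eq_min (map_crop_type_to_market_crop crop_type) prices 4 (le_refl 4), minRank_char]
  simp only [pvFallback]
  by_cases hP : pvMem prices (map_crop_type_to_market_crop crop_type) <;> by_cases hW : pvMem prices "wheat" <;>
    by_cases hM : pvMem prices "maize" <;> by_cases hG : pvMem prices "grape" <;>
    simp [hP, hW, hM, hG, pvNames, PySem.Dict.ofList] <;> exact ⟨rfl, rfl⟩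

-- ===== VERDICT (by name: the statement is the Claim_ definition above) =====
theorem select_crop_from_market_prices_spec : Claim_equal_select_crop_from_market_prices := by
  intro prices crop_type _
  unfold Spec_select_crop_from_market_prices
  exact ab_eq prices crop_type
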